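-- pv_equiv track=rewrite | github.com/pkivolowitz/CSC1100-J-2020 | programs/fight.py | GetSongByConference
-- ===== SOURCE A (Python) =====
-- def GetSongByConference(songs, conferences):
-- 	"""	This function pulls data from the compound dictionary and builds
-- 		a single list containing the number of songs introduced in every year
-- 		one for each conference (which is a dictionary key).
-- 	"""
-- 	song_intros = {}
-- 	for conference in conferences:
-- 		song_intros[conference] = []
-- 		cumulative_count = 0
-- 		for year in songs.keys():
-- 			if conference in songs[year]:
-- 				cumulative_count += songs[year][conference]
-- 			song_intros[conference].append(cumulative_count)
-- 	return song_intros
-- ===== SOURCE B (Python) =====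
-- def _prefix(xs):
--     """Divide-and-conquer prefix sums: prefix-sum each half, then shift the
--     right half by the left half's total."""
--     if len(xs) <= 1:
--         return list(xs)
--     m = len(xs) // 2
--     left = _prefix(xs[:m])
--     right = _prefix(xs[m:])
--     off = left[-1]
--     return left + [off + r for r in right]
--
--
-- def GetSongByConference(songs, conferences):
--     """Two staged passes per conference: extract the per-year delta list with
--     dict.get (absent year contributes 0), then take its prefix sums by divide
--     and conquer. No membership test, no mutable accumulator."""
--     year_values = list(songs.values())
--     return {c: _prefix([yd.get(c, 0) for yd in year_values])
--             for c in conferences}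
-- ===== Notes on version B (the rewrite author's own statement) =====
-- stated objective: alternative
-- what changed: B replaces A's single fused loop (membership test + scalar accumulator appended year by year) with two staged passes per conference: a comprehension extracting the per-year delta list via dict.get (absent = 0), then a divide-and-conquer prefix-sum (prefix each half, shift the right half by the left total); the whole result is one dict comprehension, no mutation.
import Mathlib
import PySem

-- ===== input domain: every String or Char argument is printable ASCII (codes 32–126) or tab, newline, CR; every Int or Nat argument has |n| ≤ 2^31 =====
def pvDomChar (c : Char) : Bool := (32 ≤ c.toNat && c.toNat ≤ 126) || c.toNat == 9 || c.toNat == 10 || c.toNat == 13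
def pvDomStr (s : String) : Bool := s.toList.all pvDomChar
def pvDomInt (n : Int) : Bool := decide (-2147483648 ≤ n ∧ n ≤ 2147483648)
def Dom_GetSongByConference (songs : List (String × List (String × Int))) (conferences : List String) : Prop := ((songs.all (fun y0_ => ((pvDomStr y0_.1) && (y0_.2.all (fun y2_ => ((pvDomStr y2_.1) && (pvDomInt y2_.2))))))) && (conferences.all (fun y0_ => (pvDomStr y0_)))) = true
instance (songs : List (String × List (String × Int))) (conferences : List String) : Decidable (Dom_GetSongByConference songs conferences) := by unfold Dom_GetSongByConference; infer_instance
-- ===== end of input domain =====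

-- B replaces A's fused loop (membership test + scalar accumulator appended year by
-- year) by two staged passes per conference: extract the per-year delta list via
-- dict.get, then a recursive prefix-sum scan (objective: alternative, same cost).

-- ===== PORT A =====
-- Literal port of A: outer loop over conferences; per conference a scalar
-- cumulative_count scanned over songs.keys(), appending into song_intros[conference].
def GetSongByConference (songs : List (String × List (String × Int))) (conferences : List String) : List (String × List Int) :=
  let d := PySem.Dict.ofList songs
  (conferences.foldl (fun (si : PySem.Dict String (List Int)) conference =>
    let si := si.insert conference []
    let st := d.keys.foldl (fun (st : Int × PySem.Dict String (List Int)) year =>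
        let yd := PySem.Dict.ofList (d.getD year [])
        let cum := if yd.contains conference then st.1 + yd.getD conference 0 else st.1
        (cum, st.2.modify conference [] (· ++ [cum]))) (0, si)
    st.2) PySem.Dict.empty).items

-- ===== PORT B =====
-- Literal port of Source B's _prefix: divide-and-conquer prefix sums.
-- left[-1] is ported with pyGetD (default 0); it is exact here since in the
-- else-branch left is nonempty, where Python's left[-1] returns the last element.
def pvPrefixDC (xs : List Int) : List Int :=
  if h : xs.length ≤ 1 then xs
  else
    let m := xs.length / 2
    let left := pvPrefixDC (xs.take m)
    let right := pvPrefixDC (xs.drop m)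
    let off := PySem.List.pyGetD left (-1) 0
    left ++ right.map (fun r => off + r)
termination_by xs.length
decreasing_by
  · simp only [List.length_take]; omega
  · simp only [List.length_drop]; omega

-- dict comprehension over conferences; value = _prefix of the delta list extracted
-- from songs.values() with yd.get(c, 0).
def GetSongByConference_alt (songs : List (String × List (String × Int))) (conferences : List String) : List (String × List Int) :=
  let yearValues := (PySem.Dict.ofList songs).values
  (conferences.foldl (fun (m : PySem.Dict String (List Int)) c =>
      m.insert c (pvPrefixDC (yearValues.map (fun yd => (PySem.Dict.ofList yd).getD c 0))))
    PySem.Dict.empty).items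

-- ===== PRECONDITION & SPEC =====
def Spec_GetSongByConference (songs : List (String × List (String × Int))) (conferences : List String) (out : List (String × List Int)) : Prop := out = GetSongByConference_alt songs conferences
instance (songs : List (String × List (String × Int))) (conferences : List String) (out : List (String × List Int)) : Decidable (Spec_GetSongByConference songs conferences out) := by unfold Spec_GetSongByConference; infer_instance

-- ===== CLAIM (what is proved, stated in full; the proofs are below) =====
def Claim_equal_GetSongByConference : Prop := ∀ (songs : List (String × List (String × Int))) (conferences : List String), Dom_GetSongByConference songs conferences → Spec_GetSongByConference songs conferences (GetSongByConference songs conferences)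

-- ===== LEMMAS AND PROOFS =====

-- proof-only linear prefix-sum, the common meeting point of A's scan and B's D&C
def pvPrefix (xs : List Int) (acc : Int) : List Int :=
  match xs with
  | [] => []
  | x :: t => (acc + x) :: pvPrefix t (acc + x)

theorem pvPrefix_append (xs ys : List Int) : ∀ a : Int,
    pvPrefix (xs ++ ys) a = pvPrefix xs a ++ pvPrefix ys (a + xs.sum) := by
  induction xs with
  | nil => intro a; simp [pvPrefix]
  | cons x t ih =>
    intro a
    simp only [List.cons_append, pvPrefix, List.sum_cons, ih (a + x)]
    rw [show a + (x + t.sum) = a + x + t.sum by ring]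

theorem pvPrefix_shift (xs : List Int) : ∀ a b : Int,
    pvPrefix xs (a + b) = (pvPrefix xs b).map (fun r => a + r) := by
  induction xs with
  | nil => intro a b; simp [pvPrefix]
  | cons x t ih =>
    intro a b
    simp only [pvPrefix, List.map_cons]
    rw [show a + b + x = a + (b + x) by ring, ih]

theorem pvPrefix_ne_nil (xs : List Int) (hx : xs ≠ []) (a : Int) : pvPrefix xs a ≠ [] := by
  cases xs with
  | nil => exact absurd rfl hx
  | cons x t => simp [pvPrefix]

theorem pvPrefix_getLast? : ∀ (xs : List Int), xs ≠ [] → ∀ (a : Int),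
    (pvPrefix xs a).getLast? = some (a + xs.sum) := by
  intro xs
  induction xs with
  | nil => intro h; exact absurd rfl h
  | cons x t ih =>
    intro _ a
    cases t with
    | nil => simp [pvPrefix]
    | cons y s =>
      have h2 := ih (by simp) (a + x)
      simp only [pvPrefix] at h2 ⊢
      rw [List.getLast?_cons_cons, h2]
      simp only [List.sum_cons]
      exact congrArg some (by ring)

theorem pvPrefix_last (xs : List Int) (hx : xs ≠ []) (a d : Int) :
    PySem.List.pyGetD (pvPrefix xs a) (-1) d = a + xs.sum := by
  have hne := pvPrefix_ne_nil xs hx a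
  rw [PySem.List.pyGetD_neg_one _ _ hne]
  have h2 := pvPrefix_getLast? xs hx a
  rw [List.getLast?_eq_some_getLast hne] at h2
  exact Option.some.inj h2

theorem pvPrefixDC_eq : ∀ (n : Nat) (xs : List Int), xs.length ≤ n →
    pvPrefixDC xs = pvPrefix xs 0 := by
  intro n
  induction n with
  | zero =>
    intro xs h
    have : xs = [] := List.eq_nil_of_length_eq_zero (Nat.le_zero.1 h)
    subst this
    rw [pvPrefixDC]
    simp [pvPrefix]
  | succ n ih =>
    intro xs h
    rw [pvPrefixDC]
    by_cases h1 : xs.length ≤ 1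
    · rw [dif_pos h1]
      match xs, h1 with
      | [], _ => simp [pvPrefix]
      | [x], _ => simp [pvPrefix]
    · rw [dif_neg h1]
      have hm : xs.length / 2 < xs.length := by omega
      have hl : (xs.take (xs.length / 2)).length ≤ n := by
        simp only [List.length_take]; omega
      have hr : (xs.drop (xs.length / 2)).length ≤ n := by
        simp only [List.length_drop]; omega
      have htne : xs.take (xs.length / 2) ≠ [] := by
        intro he
        have := congrArg List.length he
        simp only [List.length_take, List.length_nil] at this
        omega
      simp only [ih _ hl, ih _ hr, pvPrefix_last _ htne 0 0, zero_add]
      rw [← pvPrefix_shift, add_zero]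
      conv_rhs => rw [← List.take_append_drop (xs.length / 2) xs]
      rw [pvPrefix_append, zero_add]

def pvStep (yd : PySem.Dict String Int) (c : String) (a : Int) : Int :=
  if yd.contains c then a + yd.getD c 0 else a

def pvScan (d : PySem.Dict String (List (String × Int))) (c : String) (a : Int) : List String → List Int
  | [] => []
  | y :: t =>
    let a' := pvStep (PySem.Dict.ofList (d.getD y [])) c a
    a' :: pvScan d c a' t

theorem pvA_inner (d : PySem.Dict String (List (String × Int))) (c : String) :
    ∀ (ys : List String) (a : Int) (si : PySem.Dict String (List Int)), c ∈ si.keys →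
    let R := ys.foldl (fun (st : Int × PySem.Dict String (List Int)) year =>
        let yd := PySem.Dict.ofList (d.getD year [])
        let cum := if yd.contains c then st.1 + yd.getD c 0 else st.1
        (cum, st.2.modify c [] (· ++ [cum]))) (a, si)
    R.2.keys = si.keys ∧
      ∀ c', R.2.getD c' [] = if c' = c then si.getD c [] ++ pvScan d c a ys else si.getD c' [] := by
  intro ys
  induction ys with
  | nil =>
    intro a si hc
    simp [pvScan]
  | cons y t ih =>
    intro a si hc
    simp only [List.foldl_cons]
    set a' := if (PySem.Dict.ofList (d.getD y [])).contains c then a + (PySem.Dict.ofList (d.getD y [])).getD c 0 else a with ha'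
    set si' := si.modify c [] (· ++ [a']) with hsi'
    have hkeys : si'.keys = si.keys := by
      rw [hsi', PySem.Dict.keys_modify, PySem.Dict.keys_insert_of_contains]
      exact (PySem.Dict.contains_iff_mem_keys si c).2 hc
    have hc' : c ∈ si'.keys := hkeys ▸ hc
    obtain ⟨hk, hg⟩ := ih a' si' hc'
    refine ⟨hk.trans hkeys, fun c' => ?_⟩
    rw [hg c']
    by_cases h : c' = c
    · subst h
      rw [if_pos rfl, if_pos rfl]
      rw [hsi', PySem.Dict.getD_modify_self]
      show (si.getD c' [] ++ [a']) ++ pvScan d c' a' t = si.getD c' [] ++ pvScan d c' a (y :: t)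
      rw [List.append_assoc]
      simp [pvScan, pvStep, ha']
    · simp only [if_neg h]
      rw [hsi', PySem.Dict.getD_modify_of_ne _ _ _ h]

theorem pvA_outer (d : PySem.Dict String (List (String × Int))) (ys : List String) :
    ∀ (confs : List String) (si : PySem.Dict String (List Int)),
    let R := confs.foldl (fun (si : PySem.Dict String (List Int)) conference =>
        let si := si.insert conference []
        let st := ys.foldl (fun (st : Int × PySem.Dict String (List Int)) year =>
            let yd := PySem.Dict.ofList (d.getD year [])
            let cum := if yd.contains conference then st.1 + yd.getD conference 0 else st.1
            (cum, st.2.modify conference [] (· ++ [cum]))) (0, si)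
        st.2) si
    R.keys = PySem.Set.update si.keys confs ∧
      ∀ c', R.getD c' [] = if c' ∈ confs then pvScan d c' 0 ys else si.getD c' [] := by
  intro confs
  induction confs with
  | nil => intro si; simp [PySem.Set.update_nil]
  | cons co t ih =>
    intro si
    simp only [List.foldl_cons]
    have hco : co ∈ (si.insert co []).keys := (PySem.Dict.mem_keys_insert _ _ _ _).2 (Or.inl rfl)
    obtain ⟨hk1, hg1⟩ := pvA_inner d co ys 0 (si.insert co []) hco
    set si1 := (ys.foldl (fun (st : Int × PySem.Dict String (List Int)) year =>
        let yd := PySem.Dict.ofList (d.getD year [])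
        let cum := if yd.contains co then st.1 + yd.getD co 0 else st.1
        (cum, st.2.modify co [] (· ++ [cum]))) (0, si.insert co [])).2 with hsi1
    have hkeys1 : si1.keys = PySem.Set.add si.keys co := by
      rw [hk1]
      by_cases h : co ∈ si.keys
      · rw [PySem.Dict.keys_insert_of_contains _ _ ((PySem.Dict.contains_iff_mem_keys si co).2 h),
          PySem.Set.add_of_mem h]
      · rw [PySem.Dict.keys_insert_of_not_contains _ _ (by
            simpa using (PySem.Dict.contains_iff_mem_keys si co).not.2 h),
          PySem.Set.add_of_not_mem h]
    obtain ⟨hk, hg⟩ := ih si1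
    refine ⟨hk.trans (by rw [hkeys1, PySem.Set.update_cons]), fun c' => ?_⟩
    rw [hg c']
    by_cases ht : c' ∈ t
    · simp [ht]
    · simp only [if_neg ht]
      rw [hg1 c']
      by_cases hc : c' = co
      · subst hc
        simp [PySem.Dict.getD_insert_self, List.mem_cons]
      · simp [List.mem_cons, ht, PySem.Dict.getD_insert, hc]

-- the B-side dict comprehension, with a per-key value function
theorem pvB_build (f : String → List Int) :
    ∀ (confs : List String) (m : PySem.Dict String (List Int)),
    let R := confs.foldl (fun (m : PySem.Dict String (List Int)) c => m.insert c (f c)) m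
    R.keys = PySem.Set.update m.keys confs ∧
      ∀ c', R.getD c' [] = if c' ∈ confs then f c' else m.getD c' [] := by
  intro confs
  induction confs with
  | nil => intro m; simp [PySem.Set.update_nil]
  | cons co t ih =>
    intro m
    simp only [List.foldl_cons]
    obtain ⟨hk, hg⟩ := ih (m.insert co (f co))
    have hkeys : (m.insert co (f co)).keys = PySem.Set.add m.keys co := by
      by_cases h : co ∈ m.keys
      · rw [PySem.Dict.keys_insert_of_contains _ _ ((PySem.Dict.contains_iff_mem_keys m co).2 h),
          PySem.Set.add_of_mem h]
      · rw [PySem.Dict.keys_insert_of_not_contains _ _ (by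
            simpa using (PySem.Dict.contains_iff_mem_keys m co).not.2 h),
          PySem.Set.add_of_not_mem h]
    refine ⟨hk.trans (by rw [hkeys, PySem.Set.update_cons]), fun c' => ?_⟩
    rw [hg c']
    by_cases ht : c' ∈ t
    · simp [ht]
    · by_cases hc : c' = co
      · subst hc; simp [ht, PySem.Dict.getD_insert_self]
      · simp [List.mem_cons, ht, hc, PySem.Dict.getD_insert]

-- pvStep always adds the getD value (absent key contributes 0)
theorem pvStep_eq_add (yd : PySem.Dict String Int) (c : String) (a : Int) :
    pvStep yd c a = a + yd.getD c 0 := by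
  unfold pvStep
  by_cases h : yd.contains c = true
  · rw [if_pos h]
  · rw [if_neg h, PySem.Dict.getD_of_not_contains _ _ (by simpa using h)]
    omega

-- A's fused scan equals B's staged extract-then-prefix-sum
theorem pvScan_eq_prefix (d : PySem.Dict String (List (String × Int))) (c : String) :
    ∀ (ys : List String) (a : Int),
      pvScan d c a ys = pvPrefix (ys.map (fun y => (PySem.Dict.ofList (d.getD y [])).getD c 0)) a := by
  intro ys
  induction ys with
  | nil => intro a; simp [pvScan, pvPrefix]
  | cons y t ih =>
    intro a
    simp only [pvScan, List.map_cons, pvPrefix, pvStep_eq_add]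
    exact congrArg _ (ih _)

theorem pvMain (songs : List (String × List (String × Int))) (conferences : List String) :
    GetSongByConference songs conferences = GetSongByConference_alt songs conferences := by
  unfold GetSongByConference GetSongByConference_alt
  dsimp only
  set d := PySem.Dict.ofList songs with hd
  have hvals : d.values = d.keys.map (fun y => d.getD y []) :=
    PySem.Dict.values_eq_map_keys d (PySem.Dict.nodup_keys_ofList songs) []
  rw [hvals]
  obtain ⟨hkA, hgA⟩ := pvA_outer d d.keys conferences PySem.Dict.empty
  obtain ⟨hkB, hgB⟩ := pvB_build
    (fun c => pvPrefixDC ((d.keys.map (fun y => d.getD y [])).map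
      (fun yd => (PySem.Dict.ofList yd).getD c 0))) conferences PySem.Dict.empty
  dsimp only at hkA hgA hkB hgB
  have hemp : (PySem.Dict.empty : PySem.Dict String (List Int)).keys = [] := rfl
  set ks := PySem.Set.ofList conferences with hks
  have hkA' : _ = ks := hkA.trans (by rw [hemp, PySem.Set.update_nil_left])
  have hkB' : _ = ks := hkB.trans (by rw [hemp, PySem.Set.update_nil_left])
  have pks : ks.Nodup := hks ▸ PySem.Set.nodup_ofList conferences
  rw [PySem.Dict.items_eq_map_keys _ (hkA'.symm ▸ pks) ([] : List Int),
      PySem.Dict.items_eq_map_keys _ (hkB'.symm ▸ pks) ([] : List Int), hkA', hkB']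
  refine List.map_congr_left (fun c hc => ?_)
  have hcm : c ∈ conferences := (PySem.Set.mem_ofList conferences c).1 (hks ▸ hc)
  rw [hgA c, hgB c, if_pos hcm, if_pos hcm, pvScan_eq_prefix,
    pvPrefixDC_eq _ _ (le_refl _), List.map_map]
  rfl

-- ===== VERDICT (by name: the statement is the Claim_ definition above) =====
theorem GetSongByConference_spec : Claim_equal_GetSongByConference := by
  intro songs conferences _
  unfold Spec_GetSongByConference
  exact pvMain songs conferences
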